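-- pv_equiv track=rewrite | github.com/chaitu31g/circuitai-rag | rag_pipeline/parsers/hybrid_table_parser_v3.py | _unmerge_multiline_row
-- ===== SOURCE A (Python) =====
-- def _unmerge_multiline_row(row):
--     """Expand pdfplumber rows with multi-line cells. Protects Param/Symbol/Unit columns."""
--     cells = [str(c).strip() if c is not None else "" for c in row]
--     value_lines = [len(c.split('\n')) for c in cells[3:-1] if c]
--     max_val_lines = max(value_lines) if value_lines else 1
--     if max_val_lines <= 1:
--         return [[c.replace('\n', ' ').replace('  ', ' ').strip() for c in cells]]
--     expanded = []
--     for i in range(max_val_lines):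
--         new_row = []
--         for col_idx, c in enumerate(cells):
--             lines = [l.strip() for l in c.split('\n')]
--             if col_idx in (0, 1, len(cells) - 1):
--                 new_row.append(" ".join(l for l in lines if l) if i == 0 else "")
--             else:
--                 if len(lines) == max_val_lines:
--                     new_row.append(lines[i])
--                 else:
--                     new_row.append(" ".join(l for l in lines if l) if i == 0 else "")
--         expanded.append(new_row)
--     return expanded
-- ===== SOURCE B (Python) =====
-- def _unmerge_multiline_row(row):
--     """Expand pdfplumber rows with multi-line cells: build per-column output lists once, then transpose."""
--     cells = [str(c).strip() if c is not None else "" for c in row]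
--     value_lines = [len(c.split('\n')) for c in cells[3:-1] if c]
--     max_val_lines = max(value_lines) if value_lines else 1
--     if max_val_lines <= 1:
--         return [[c.replace('\n', ' ').replace('  ', ' ').strip() for c in cells]]
--     last = len(cells) - 1
--
--     def column(idx, c):
--         lines = [l.strip() for l in c.split('\n')]
--         if idx not in (0, 1, last) and len(lines) == max_val_lines:
--             return lines
--         joined = " ".join(l for l in lines if l)
--         return [joined] + [""] * (max_val_lines - 1)
--
--     cols = [column(i, c) for i, c in enumerate(cells)]
--     return [list(t) for t in zip(*cols)]
-- ===== Notes on version B (the rewrite author's own statement) =====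
-- stated objective: alternative
-- what changed: The expansion path is rebuilt column-major: each cell's stripped split-lines are computed once to produce its whole output column, and the result is obtained by transposing the columns with zip(*cols), instead of A's row-outer nested loop that re-splits and re-strips every cell for each of the max_val_lines output rows.
import Mathlib
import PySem

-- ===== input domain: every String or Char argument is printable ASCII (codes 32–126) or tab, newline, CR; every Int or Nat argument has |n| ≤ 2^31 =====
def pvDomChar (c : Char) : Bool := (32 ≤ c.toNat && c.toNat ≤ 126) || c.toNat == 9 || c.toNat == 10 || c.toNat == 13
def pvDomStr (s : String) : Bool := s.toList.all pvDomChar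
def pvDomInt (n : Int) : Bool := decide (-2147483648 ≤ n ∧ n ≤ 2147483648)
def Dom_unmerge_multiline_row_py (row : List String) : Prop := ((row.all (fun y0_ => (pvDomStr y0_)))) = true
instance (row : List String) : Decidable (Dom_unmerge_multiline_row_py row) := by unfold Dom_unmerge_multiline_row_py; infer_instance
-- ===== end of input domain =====

-- B replaces A's row-outer nested loop (which re-splits every cell once per output row) by building each
-- column's output list once and transposing (zip(*cols)); objective: alternative decomposition (column-major).

-- ===== PORT A =====
-- shared first half of both Pythons: cells normalization, max_val_lines, and the <=1 early-return row
def pyCells (row : List String) : List String := row.map PySem.Str.strip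

def pyMaxv (cells : List String) : Nat :=
  let value_lines := ((PySem.List.slice cells (some 3) (some (-1))).filter (fun c => c != "")).map
    (fun c => ((PySem.Str.split? c "\n").getD []).length)  -- sep "\n" ≠ "": split? is never none
  match PySem.List.max? value_lines (fun x => x) with
  | some m => m
  | none => 1

def pyCollapsed (cells : List String) : List (List String) :=
  [cells.map (fun c => PySem.Str.strip (PySem.Str.replace (PySem.Str.replace c "\n" " ") "  " " "))]

-- lines = [l.strip() for l in c.split('\n')]  (sep "\n" ≠ "": split? is never none)
def pyLines (c : String) : List String := ((PySem.Str.split? c "\n").getD []).map PySem.Str.strip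

-- one cell of A's inner loop body (i : row index of the expansion; p : (col_idx, cell))
def pyACell (max_val_lines : Nat) (last : Int) (i : Nat) (p : Int × String) : String :=
  let lines := pyLines p.2
  if p.1 = 0 ∨ p.1 = 1 ∨ p.1 = last then
    (if i = 0 then PySem.Str.join " " (lines.filter (fun l => l != "")) else "")
  else if lines.length = max_val_lines then
    lines.getD i ""   -- Python lines[i]: in this branch lines.length = max_val_lines and i < max_val_lines, so always in range
  else
    (if i = 0 then PySem.Str.join " " (lines.filter (fun l => l != "")) else "")

def unmerge_multiline_row_py (row : List String) : List (List String) :=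
  let cells := pyCells row
  let max_val_lines := pyMaxv cells
  if max_val_lines ≤ 1 then pyCollapsed cells
  else
    (List.range max_val_lines).foldl (fun expanded i =>
      expanded ++ [(PySem.List.enumerate cells 0).foldl (fun new_row p =>
        new_row ++ [pyACell max_val_lines ((cells.length : Int) - 1) i p]) []]) []

-- ===== PORT B =====
-- B's column(idx, c): the whole output column for one cell
def pyColumn (max_val_lines : Nat) (last : Int) (idx : Int) (c : String) : List String :=
  if ¬(idx = 0 ∨ idx = 1 ∨ idx = last) ∧ (pyLines c).length = max_val_lines then pyLines c
  else PySem.Str.join " " ((pyLines c).filter (fun l => l != "")) :: List.replicate (max_val_lines - 1) ""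

-- zip(*cols) as lists: rows of the i-th entries, truncated at the shortest column
def pyZipStar (cols : List (List String)) : List (List String) :=
  match cols with
  | [] => []
  | c :: cs => (List.range (cs.foldl (fun m l => min m l.length) c.length)).map
      (fun i => (c :: cs).map (fun l => l.getD i ""))

def unmerge_multiline_row_py_alt (row : List String) : List (List String) :=
  let cells := pyCells row
  let max_val_lines := pyMaxv cells
  if max_val_lines ≤ 1 then pyCollapsed cells
  else
    let last : Int := (cells.length : Int) - 1
    pyZipStar ((PySem.List.enumerate cells 0).map (fun p => pyColumn max_val_lines last p.1 p.2))

-- ===== PRECONDITION & SPEC =====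
def Spec_unmerge_multiline_row_py (row : List String) (out : List (List String)) : Prop := out = unmerge_multiline_row_py_alt row
instance (row : List String) (out : List (List String)) : Decidable (Spec_unmerge_multiline_row_py row out) := by unfold Spec_unmerge_multiline_row_py; infer_instance

-- ===== CLAIM (what is proved, stated in full; the proofs are below) =====
def Claim_equal_unmerge_multiline_row_py : Prop := ∀ (row : List String), Dom_unmerge_multiline_row_py row → Spec_unmerge_multiline_row_py row (unmerge_multiline_row_py row)

-- ===== LEMMAS AND PROOFS =====

lemma pyColumn_length (m : Nat) (hm : 1 ≤ m) (last idx : Int) (c : String) :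
    (pyColumn m last idx c).length = m := by
  unfold pyColumn
  split
  · next h => exact h.2
  · simp; omega

lemma foldl_min_const (m : Nat) (cs : List (List String)) (h : ∀ l ∈ cs, l.length = m) :
    cs.foldl (fun a l => min a l.length) m = m := by
  induction cs with
  | nil => rfl
  | cons c2 cs ih =>
    simp only [List.foldl_cons, h c2 (by simp), min_self]
    exact ih (fun l hl => h l (by simp [hl]))

lemma pyColumn_getD (m : Nat) (last idx : Int) (c : String) (i : Nat) :
    (pyColumn m last idx c).getD i "" = pyACell m last i (idx, c) := by
  unfold pyColumn pyACell
  by_cases hp : idx = 0 ∨ idx = 1 ∨ idx = last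
  · simp only [hp, not_true_eq_false, false_and, if_false, if_true]
    cases i with
    | zero => simp
    | succ j => simp
  · simp only [hp, not_false_eq_true, true_and, if_false]
    by_cases hl : (pyLines c).length = m
    · simp [hl]
    · simp only [hl, if_false]
      cases i with
      | zero => simp
      | succ j => simp

lemma expansion_eq (cells : List String) (m : Nat) (hm : 2 ≤ m) (hne : cells ≠ []) :
    (List.range m).foldl (fun expanded i =>
      expanded ++ [(PySem.List.enumerate cells 0).foldl (fun new_row p =>
        new_row ++ [pyACell m ((cells.length : Int) - 1) i p]) []]) []
    = pyZipStar ((PySem.List.enumerate cells 0).map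
        (fun p => pyColumn m ((cells.length : Int) - 1) p.1 p.2)) := by
  have hA : ∀ (i : Nat) (l : List (Int × String)),
      l.foldl (fun new_row p => new_row ++ [pyACell m ((cells.length : Int) - 1) i p]) []
      = l.map (fun p => pyACell m ((cells.length : Int) - 1) i p) := by
    intro i l
    simpa using PySem.List.foldl_append_singleton_eq_map
      (l := l) (f := fun p => pyACell m ((cells.length : Int) - 1) i p) (acc := [])
  have houter :
      (List.range m).foldl (fun expanded i =>
        expanded ++ [(PySem.List.enumerate cells 0).foldl (fun new_row p =>
          new_row ++ [pyACell m ((cells.length : Int) - 1) i p]) []]) []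
      = (List.range m).map (fun i => (PySem.List.enumerate cells 0).foldl (fun new_row p =>
          new_row ++ [pyACell m ((cells.length : Int) - 1) i p]) []) := by
    simpa using PySem.List.foldl_append_singleton_eq_map
      (l := List.range m)
      (f := fun i => (PySem.List.enumerate cells 0).foldl (fun new_row p =>
        new_row ++ [pyACell m ((cells.length : Int) - 1) i p]) []) (acc := [])
  rw [houter]
  obtain ⟨x, xs, rfl⟩ : ∃ x xs, cells = x :: xs := by
    cases cells with
    | nil => exact absurd rfl hne
    | cons x xs => exact ⟨x, xs, rfl⟩
  rw [PySem.List.enumerate_cons]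
  simp only [List.map_cons, pyZipStar]
  have hmin : ((PySem.List.enumerate xs (0 + 1)).map
        (fun p => pyColumn m (((x :: xs).length : Int) - 1) p.1 p.2)).foldl
      (fun a l => min a l.length)
      (pyColumn m (((x :: xs).length : Int) - 1) 0 x).length = m := by
    rw [pyColumn_length m (by omega)]
    exact foldl_min_const m _ (fun l hl => by
      simp only [List.mem_map] at hl; obtain ⟨p, _, rfl⟩ := hl
      exact pyColumn_length m (by omega) _ _ _)
  rw [hmin]
  apply List.map_congr_left
  intro i hi
  rw [hA i, List.map_cons, List.map_map]
  congr 1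
  · exact (pyColumn_getD m _ 0 x i).symm
  · apply List.map_congr_left
    intro p _
    simp only [Function.comp_apply]
    cases p with
    | mk a b => exact (pyColumn_getD m _ a b i).symm

lemma cells_ne_nil_of_maxv (cells : List String) (h : ¬ pyMaxv cells ≤ 1) : cells ≠ [] := by
  intro hnil
  subst hnil
  simp [pyMaxv, PySem.List.slice, PySem.List.max?] at h

-- ===== VERDICT (by name: the statement is the Claim_ definition above) =====
theorem unmerge_multiline_row_py_spec : Claim_equal_unmerge_multiline_row_py := by
  intro row _
  unfold Spec_unmerge_multiline_row_py unmerge_multiline_row_py unmerge_multiline_row_py_alt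
  by_cases h : pyMaxv (pyCells row) ≤ 1
  · simp [h]
  · simp only [h, if_false]
    exact expansion_eq (pyCells row) (pyMaxv (pyCells row)) (by omega)
      (cells_ne_nil_of_maxv _ h)
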